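-- pv_equiv track=rewrite | github.com/teaplusottp/ARES_THE_MAZE | Source/plugin/getInput.py | check_maze
-- ===== SOURCE A (Python) =====
-- def check_maze(maze):
--     rows, cols = len(maze), len(maze[0])
--     for col in range(cols):
--         found_block_down = False
--         found_block_up = False
--         for row in range(rows):
--             if maze[row][col] == '#':
--                 found_block_up = True
--             elif not found_block_up and maze[row][col] == ' ':
--                 maze[row][col] = ''
--             if maze[rows - 1 - row][col] == '#':
--                 found_block_down = True
--             elif not found_block_down and maze[rows - 1 - row][col] == ' ':
--                 maze[rows - 1 - row][col] = ''
--     for row in range(rows):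
--         found_block = False
--         for col in range(cols):
--             if maze[row][col] == '#':
--                 found_block = True
--             elif not found_block and maze[row][col] == ' ':
--                 maze[row][col] = ''
--
--     return maze
-- ===== SOURCE B (Python) =====
-- def check_maze(maze):
--     rows, cols = len(maze), len(maze[0])
--     col_hashes = [[r for r in range(rows) if maze[r][c] == '#'] for c in range(cols)]
--     top = [h[0] if h else rows for h in col_hashes]
--     bot = [h[-1] if h else -1 for h in col_hashes]
--     for r in range(rows):
--         row_hash = [c for c in range(cols) if maze[r][c] == '#']
--         first = row_hash[0] if row_hash else cols
--         maze[r][:cols] = ['' if maze[r][c] == ' ' and (r < top[c] or r > bot[c] or c < first)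
--                           else maze[r][c] for c in range(cols)]
--     return maze
-- ===== Notes on version B (the rewrite author's own statement) =====
-- stated objective: alternative
-- what changed: Replaces A's three interleaved boolean-flag mutation scans (a simultaneous top-down/bottom-up column sweep, then a per-row flag sweep) by a locate-then-transform design: first precompute each column's topmost/bottommost '#' index and each row's first '#' index, then rewrite each row in one pass from a per-cell boundary formula.
import Mathlib
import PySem

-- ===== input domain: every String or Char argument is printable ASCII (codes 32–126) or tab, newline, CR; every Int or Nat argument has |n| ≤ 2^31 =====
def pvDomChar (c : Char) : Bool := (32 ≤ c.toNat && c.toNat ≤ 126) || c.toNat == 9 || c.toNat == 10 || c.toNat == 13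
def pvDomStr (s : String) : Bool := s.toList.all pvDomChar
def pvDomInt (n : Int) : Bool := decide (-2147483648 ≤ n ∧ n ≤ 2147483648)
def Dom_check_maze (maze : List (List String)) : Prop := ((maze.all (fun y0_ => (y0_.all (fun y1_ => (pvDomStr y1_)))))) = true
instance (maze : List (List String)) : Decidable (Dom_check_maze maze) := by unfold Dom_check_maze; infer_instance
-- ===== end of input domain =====

-- B replaces A's interleaved boolean-flag mutation scans by precomputing each column's top/bottom '#'
-- index and each row's first '#' index, then rewriting each row in one pass (alternative decomposition,
-- same cost). Equivalence is about the returned value; both Pythons also mutate `maze` in place.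


-- ===== PORT A =====
-- maze[r][c] read (used in-range only; "" default outside) and the in-place write maze[r][c] = v
def pvCell (m : List (List String)) (r c : Nat) : String := (m.getD r []).getD c ""
def pvSet (m : List (List String)) (r c : Nat) (v : String) : List (List String) :=
  m.set r ((m.getD r []).set c v)

-- body of A's inner column loop: state (maze, found_block_up, found_block_down)
def pvColStep (rows c : Nat) (st : List (List String) × Bool × Bool) (row : Nat) :
    List (List String) × Bool × Bool :=
  let p : List (List String) × Bool :=
    if pvCell st.1 row c == "#" then (st.1, true)
    else if (!st.2.1) && (pvCell st.1 row c == " ") then (pvSet st.1 row c "", st.2.1)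
    else (st.1, st.2.1)
  let q : List (List String) × Bool :=
    if pvCell p.1 (rows - 1 - row) c == "#" then (p.1, true)
    else if (!st.2.2) && (pvCell p.1 (rows - 1 - row) c == " ") then
      (pvSet p.1 (rows - 1 - row) c "", st.2.2)
    else (p.1, st.2.2)
  (q.1, p.2, q.2)

-- body of A's inner row loop: state (maze, found_block)
def pvRowStep (r : Nat) (st : List (List String) × Bool) (c : Nat) :
    List (List String) × Bool :=
  if pvCell st.1 r c == "#" then (st.1, true)
  else if (!st.2) && (pvCell st.1 r c == " ") then (pvSet st.1 r c "", st.2)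
  else (st.1, st.2)

def check_maze (maze : List (List String)) : List (List String) :=
  let rows := maze.length
  let cols := (maze.getD 0 []).length
  let m1 := (List.range cols).foldl
      (fun m col => ((List.range rows).foldl (pvColStep rows col) (m, false, false)).1) maze
  (List.range rows).foldl
      (fun m row => ((List.range cols).foldl (pvRowStep row) (m, false)).1) m1

-- ===== PORT B =====
-- [r for r in range(rows) if maze[r][c] == '#']
def pvColHash (maze : List (List String)) (rows c : Nat) : List Nat :=
  (List.range rows).filter (fun r => pvCell maze r c == "#")

def check_maze_alt (maze : List (List String)) : List (List String) :=
  let rows := maze.length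
  let cols := (maze.getD 0 []).length
  let top : List Nat := (List.range cols).map (fun c => (pvColHash maze rows c).headD rows)
  let bot : List Int := (List.range cols).map
      (fun c => ((pvColHash maze rows c).getLast?).elim (-1 : Int) (fun x => (x : Int)))
  (List.range rows).foldl (fun m r =>
      let first := ((List.range cols).filter (fun c => pvCell m r c == "#")).headD cols
      m.set r (((List.range cols).map (fun c =>
          if pvCell m r c == " " &&
             (decide (r < top.getD c 0) || decide ((r : Int) > bot.getD c (-1))
              || decide (c < first))
          then "" else pvCell m r c)) ++ ((m.getD r []).drop cols))) maze

-- ===== PRECONDITION & SPEC =====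
-- Pre_ is exactly A's return domain: on an empty maze, or a maze with some row shorter than
-- row 0, Python A raises IndexError.
def Pre_check_maze (maze : List (List String)) : Prop :=
  maze ≠ [] ∧ ∀ row ∈ maze, (maze.getD 0 []).length ≤ row.length
instance (maze : List (List String)) : Decidable (Pre_check_maze maze) := by
  unfold Pre_check_maze; infer_instance
def pvWitness_check_maze : List (List String) := [[" ", "#"], ["#", " "]]

def Spec_check_maze (maze : List (List String)) (out : List (List String)) : Prop := out = check_maze_alt maze
instance (maze : List (List String)) (out : List (List String)) : Decidable (Spec_check_maze maze out) := by unfold Spec_check_maze; infer_instance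

-- ===== CLAIM (what is proved, stated in full; the proofs are below) =====
def Claim_equal_check_maze : Prop := ∀ (maze : List (List String)), Dom_check_maze maze → Pre_check_maze maze → Spec_check_maze maze (check_maze maze)

-- ===== LEMMAS AND PROOFS =====

theorem pv_length_pvSet (m : List (List String)) (r c : Nat) (v : String) :
    (pvSet m r c v).length = m.length := by
  simp [pvSet]

theorem pv_getD_pvSet (m : List (List String)) (r c : Nat) (v : String) (i : Nat) :
    (pvSet m r c v).getD i [] = if i = r ∧ r < m.length then (m.getD r []).set c v else m.getD i [] := by
  unfold pvSet
  by_cases h2 : r < m.length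
  · by_cases h1 : i = r
    · subst h1
      simp [h2, List.getD_eq_getElem?_getD]
    · simp [h1, List.getD_eq_getElem?_getD, List.getElem?_set_ne (fun h => h1 h.symm)]
  · rw [List.set_eq_of_length_le (by omega)]
    simp [h2]

theorem pv_rowlen_pvSet (m : List (List String)) (r c : Nat) (v : String) (i : Nat) :
    ((pvSet m r c v).getD i []).length = (m.getD i []).length := by
  rw [pv_getD_pvSet]; split_ifs with h
  · rw [h.1]; simp
  · rfl

theorem pvCell_pvSet_ne_row (m : List (List String)) (r c : Nat) (v : String) (r' c' : Nat)
    (h : r' ≠ r) : pvCell (pvSet m r c v) r' c' = pvCell m r' c' := by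
  unfold pvCell; rw [pv_getD_pvSet]; simp [h]

theorem pvCell_pvSet_ne_col (m : List (List String)) (r c : Nat) (v : String) (r' c' : Nat)
    (h : c' ≠ c) : pvCell (pvSet m r c v) r' c' = pvCell m r' c' := by
  unfold pvCell; rw [pv_getD_pvSet]; split_ifs with h1
  · rw [h1.1]; simp [List.getD_eq_getElem?_getD, List.getElem?_set_ne (fun hh => h hh.symm)]
  · rfl

theorem pvCell_pvSet_self (m : List (List String)) (r c : Nat) (v : String)
    (hr : r < m.length) (hc : c < (m.getD r []).length) :
    pvCell (pvSet m r c v) r c = v := by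
  unfold pvCell; rw [pv_getD_pvSet]
  rw [if_pos ⟨rfl, hr⟩, List.getD_eq_getElem?_getD, List.getElem?_set_self hc]
  rfl

theorem pv_space_lt (m : List (List String)) (r c : Nat) (h : pvCell m r c = " ") :
    r < m.length ∧ c < (m.getD r []).length := by
  unfold pvCell at h
  by_cases h1 : r < m.length
  · refine ⟨h1, ?_⟩
    by_cases h2 : c < (m.getD r []).length
    · exact h2
    · exfalso; rw [List.getD_eq_getElem?_getD (l := m.getD r []), List.getElem?_eq_none (by omega)] at h
      simp at h
  · exfalso
    rw [List.getD_eq_getElem?_getD (l := m), List.getElem?_eq_none (by omega)] at h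
    simp at h

theorem blankStep (A : List (List String)) (V : Nat → String) (P : Nat → Prop)
    [DecidablePred P] (c rr : Nat) (f : Bool) (F : Prop) [Decidable F]
    (res : List (List String) × Bool)
    (hres : res = if pvCell A rr c == "#" then (A, true)
        else if (!f) && (pvCell A rr c == " ") then (pvSet A rr c "", f) else (A, f))
    (hA : ∀ r', pvCell A r' c = if P r' then "" else V r')
    (hP : ∀ r', P r' → V r' = " ")
    (hf : f = decide F) :
    (∀ r', pvCell res.1 r' c = if P r' ∨ (r' = rr ∧ V rr = " " ∧ ¬F) then "" else V r')
    ∧ res.2 = decide (F ∨ V rr = "#")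
    ∧ res.1.length = A.length
    ∧ (∀ i, ((res.1.getD i []).length = (A.getD i []).length))
    ∧ (∀ r' c', c' ≠ c → pvCell res.1 r' c' = pvCell A r' c') := by
  by_cases hvk : V rr = "#"
  · have hcell : pvCell A rr c = "#" := by
      rw [hA rr, if_neg (fun hp => by have := hP rr hp; rw [hvk] at this; exact absurd this (by decide))]
      exact hvk
    have hr : res = (A, true) := by rw [hres, if_pos (by simp [hcell])]
    subst hr
    refine ⟨?_, by simp [hvk], rfl, fun i => rfl, fun r' c' _ => rfl⟩
    intro r'
    rw [hA r']
    by_cases hp : P r'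
    · rw [if_pos hp, if_pos (Or.inl hp)]
    · rw [if_neg hp, if_neg ?_]
      rintro (h | ⟨h1, h2, h3⟩)
      · exact hp h
      · rw [hvk] at h2; exact absurd h2 (by decide)
  · have hflag : decide (F ∨ V rr = "#") = f := by
      rw [hf]; apply decide_eq_decide.mpr; constructor
      · rintro (h | h)
        · exact h
        · exact absurd h hvk
      · exact Or.inl
    have hcellne : ¬(pvCell A rr c == "#") = true := by
      simp only [beq_iff_eq]
      rw [hA rr]
      by_cases hp : P rr
      · rw [if_pos hp]; decide
      · rw [if_neg hp]; exact hvk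
    by_cases hF : F
    · have hfT : f = true := by rw [hf]; simpa using hF
      have hr : res = (A, f) := by
        rw [hres, if_neg hcellne, if_neg (by simp [hfT])]
      subst hr
      refine ⟨?_, by rw [hflag], rfl, fun i => rfl, fun r' c' _ => rfl⟩
      intro r'
      rw [hA r']
      by_cases hp : P r'
      · rw [if_pos hp, if_pos (Or.inl hp)]
      · rw [if_neg hp, if_neg ?_]
        rintro (h | ⟨h1, h2, h3⟩)
        · exact hp h
        · exact h3 hF
    · have hfF : f = false := by rw [hf]; simpa using hF
      by_cases hp0 : P rr
      · -- cell already "", no write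
        have hcsp : ¬((pvCell A rr c) == " ") = true := by
          simp only [beq_iff_eq]; rw [hA rr, if_pos hp0]; decide
        have hr : res = (A, f) := by
          rw [hres, if_neg hcellne, if_neg (by simp [hcsp])]
        subst hr
        refine ⟨?_, by rw [hflag], rfl, fun i => rfl, fun r' c' _ => rfl⟩
        intro r'
        rw [hA r']
        by_cases hp : P r'
        · rw [if_pos hp, if_pos (Or.inl hp)]
        · rw [if_neg hp, if_neg ?_]
          rintro (h | ⟨h1, h2, h3⟩)
          · exact hp h
          · subst h1; exact hp hp0
      · by_cases hsp : V rr = " "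
        · -- blank
          have hcsp : pvCell A rr c = " " := by rw [hA rr, if_neg hp0]; exact hsp
          have hlt := pv_space_lt A rr c hcsp
          have hr : res = (pvSet A rr c "", f) := by
            rw [hres, if_neg hcellne, if_pos (by simp [hfF, hcsp])]
          subst hr
          refine ⟨?_, by rw [hflag], pv_length_pvSet A rr c "",
            fun i => pv_rowlen_pvSet A rr c "" i,
            fun r' c' h => pvCell_pvSet_ne_col A rr c "" r' c' h⟩
          intro r'
          by_cases he : r' = rr
          · subst he
            rw [pvCell_pvSet_self A r' c "" hlt.1 hlt.2, if_pos (Or.inr ⟨rfl, hsp, hF⟩)]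
          · rw [pvCell_pvSet_ne_row A rr c "" r' c he, hA r']
            by_cases hp : P r'
            · rw [if_pos hp, if_pos (Or.inl hp)]
            · rw [if_neg hp, if_neg ?_]
              rintro (h | ⟨h1, h2, h3⟩)
              · exact hp h
              · exact he h1
        · -- not a space, no write
          have hcsp : ¬((pvCell A rr c) == " ") = true := by
            simp only [beq_iff_eq]; rw [hA rr, if_neg hp0]; exact hsp
          have hr : res = (A, f) := by
            rw [hres, if_neg hcellne, if_neg (by simp [hcsp])]
          subst hr
          refine ⟨?_, by rw [hflag], rfl, fun i => rfl, fun r' c' _ => rfl⟩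
          intro r'
          rw [hA r']
          by_cases hp : P r'
          · rw [if_pos hp, if_pos (Or.inl hp)]
          · rw [if_neg hp, if_neg ?_]
            rintro (h | ⟨h1, h2, h3⟩)
            · exact hp h
            · subst h1; exact hsp h2

theorem rowScanInv (m : List (List String)) (r : Nat) (k : Nat) :
    ((List.range k).foldl (pvRowStep r) (m, false)).2
        = decide (∃ j, j < k ∧ pvCell m r j = "#")
  ∧ (∀ r' c', pvCell ((List.range k).foldl (pvRowStep r) (m, false)).1 r' c' =
      if r' = r ∧ c' < k ∧ pvCell m r c' = " " ∧ (∀ j ≤ c', pvCell m r j ≠ "#") then ""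
      else pvCell m r' c')
  ∧ ((List.range k).foldl (pvRowStep r) (m, false)).1.length = m.length
  ∧ (∀ i, (((List.range k).foldl (pvRowStep r) (m, false)).1.getD i []).length
      = (m.getD i []).length) := by
  induction k with
  | zero => simp
  | succ k IH =>
    obtain ⟨IHf, IHc, IHl, IHr⟩ := IH
    rw [List.range_succ, List.foldl_append]
    set st := (List.range k).foldl (pvRowStep r) (m, false) with hst
    have hcur : pvCell st.1 r k = pvCell m r k := by
      rw [IHc r k]; simp
    simp only [List.foldl_cons, List.foldl_nil]
    by_cases hv : pvCell m r k = "#"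
    · have hstep : pvRowStep r st k = (st.1, true) := by
        simp [pvRowStep, hcur, hv]
      rw [hstep]
      refine ⟨?_, ?_, IHl, IHr⟩
      · show true = _
        symm; rw [decide_eq_true_eq]; exact ⟨k, by omega, hv⟩
      · intro r' c'
        show pvCell st.1 r' c' = _
        rw [IHc r' c']
        by_cases h1 : r' = r ∧ c' < k ∧ pvCell m r c' = " " ∧ (∀ j ≤ c', pvCell m r j ≠ "#")
        · rw [if_pos h1, if_pos ⟨h1.1, by omega, h1.2.2⟩]
        · rw [if_neg h1, if_neg ?_]
          rintro ⟨e1, e2, e3, e4⟩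
          refine h1 ⟨e1, ?_, e3, e4⟩
          rcases Nat.lt_succ_iff_lt_or_eq.mp e2 with h | h
          · exact h
          · subst h; exact absurd e3 (by rw [hv]; decide)
    · by_cases hb : ∃ j, j < k ∧ pvCell m r j = "#"
      · have hbt : st.2 = true := by rw [IHf]; simpa using hb
        have hstep : pvRowStep r st k = (st.1, true) := by
          simp [pvRowStep, hcur, hv, hbt]
        rw [hstep]
        refine ⟨?_, ?_, IHl, IHr⟩
        · show true = _
          symm; rw [decide_eq_true_eq]
          obtain ⟨j, hj1, hj2⟩ := hb; exact ⟨j, by omega, hj2⟩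
        · intro r' c'
          show pvCell st.1 r' c' = _
          rw [IHc r' c']
          by_cases h1 : r' = r ∧ c' < k ∧ pvCell m r c' = " " ∧ (∀ j ≤ c', pvCell m r j ≠ "#")
          · rw [if_pos h1, if_pos ⟨h1.1, by omega, h1.2.2⟩]
          · rw [if_neg h1, if_neg ?_]
            rintro ⟨e1, e2, e3, e4⟩
            refine h1 ⟨e1, ?_, e3, e4⟩
            rcases Nat.lt_succ_iff_lt_or_eq.mp e2 with h | h
            · exact h
            · exfalso; subst h
              obtain ⟨j, hj1, hj2⟩ := hb
              exact e4 j (by omega) hj2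
      · have hbf : st.2 = false := by rw [IHf]; simpa using hb
        have hnall : ∀ j, j < k → pvCell m r j ≠ "#" := by
          intro j hj hc; exact hb ⟨j, hj, hc⟩
        have hflag : decide (∃ j, j < k + 1 ∧ pvCell m r j = "#") = false := by
          rw [decide_eq_false_iff_not]
          rintro ⟨j, hj, hc⟩
          rcases Nat.lt_succ_iff_lt_or_eq.mp hj with h | h
          · exact hnall j h hc
          · subst h; exact hv hc
        by_cases hsp : pvCell m r k = " "
        · have hstep : pvRowStep r st k = (pvSet st.1 r k "", false) := by
            simp [pvRowStep, hcur, hv, hbf, hsp]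
          rw [hstep]
          have hlt := pv_space_lt m r k hsp
          refine ⟨?_, ?_, ?_, ?_⟩
          · show false = _
            rw [hflag]
          · intro r' c'
            show pvCell (pvSet st.1 r k "") r' c' = _
            by_cases e1 : r' = r
            · subst e1
              by_cases e2 : c' = k
              · subst e2
                rw [pvCell_pvSet_self st.1 r' c' "" (by rw [IHl]; exact hlt.1)
                      (by rw [IHr]; exact hlt.2)]
                have hall : ∀ j ≤ c', pvCell m r' j ≠ "#" := by
                  intro j hj
                  rcases Nat.lt_succ_iff_lt_or_eq.mp (by omega : j < c' + 1) with h | h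
                  · exact hnall j h
                  · subst h; rw [hsp]; decide
                rw [if_pos ⟨rfl, by omega, hsp, hall⟩]
              · rw [pvCell_pvSet_ne_col st.1 r' k "" r' c' e2, IHc r' c']
                by_cases h1 : r' = r' ∧ c' < k ∧ pvCell m r' c' = " " ∧ (∀ j ≤ c', pvCell m r' j ≠ "#")
                · rw [if_pos h1, if_pos ⟨rfl, by omega, h1.2.2⟩]
                · rw [if_neg h1, if_neg ?_]
                  rintro ⟨-, f2, f3, f4⟩
                  exact h1 ⟨rfl, by omega, f3, f4⟩
            · rw [pvCell_pvSet_ne_row st.1 r k "" r' c' e1, IHc r' c',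
                if_neg (by rintro ⟨h, -⟩; exact e1 h), if_neg (by rintro ⟨h, -⟩; exact e1 h)]
          · show (pvSet st.1 r k "").length = _
            rw [pv_length_pvSet]; exact IHl
          · intro i
            show ((pvSet st.1 r k "").getD i []).length = _
            rw [pv_rowlen_pvSet]; exact IHr i
        · have hstep : pvRowStep r st k = (st.1, false) := by
            simp [pvRowStep, hcur, hv, hbf, hsp]
          rw [hstep]
          refine ⟨?_, ?_, IHl, IHr⟩
          · show false = _
            rw [hflag]
          · intro r' c'
            show pvCell st.1 r' c' = _
            rw [IHc r' c']
            by_cases h1 : r' = r ∧ c' < k ∧ pvCell m r c' = " " ∧ (∀ j ≤ c', pvCell m r j ≠ "#")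
            · rw [if_pos h1, if_pos ⟨h1.1, by omega, h1.2.2⟩]
            · rw [if_neg h1, if_neg ?_]
              rintro ⟨e1, e2, e3, e4⟩
              refine h1 ⟨e1, ?_, e3, e4⟩
              rcases Nat.lt_succ_iff_lt_or_eq.mp e2 with h | h
              · exact h
              · subst h; exact absurd e3 hsp

theorem colScanInv (R c : Nat) (m : List (List String)) (hlen : m.length = R)
    (k : Nat) (hk : k ≤ R) :
    (((List.range k).foldl (pvColStep R c) (m, false, false)).2.1
        = decide (∃ i, i < k ∧ pvCell m i c = "#"))
  ∧ (((List.range k).foldl (pvColStep R c) (m, false, false)).2.2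
        = decide (∃ i, i < k ∧ pvCell m (R - 1 - i) c = "#"))
  ∧ (∀ r', pvCell ((List.range k).foldl (pvColStep R c) (m, false, false)).1 r' c =
      if pvCell m r' c = " " ∧ ((r' < k ∧ ∀ i ≤ r', pvCell m i c ≠ "#")
          ∨ (R - k ≤ r' ∧ r' < R ∧ ∀ i, r' ≤ i → i < R → pvCell m i c ≠ "#"))
      then "" else pvCell m r' c)
  ∧ (∀ r' c', c' ≠ c →
      pvCell ((List.range k).foldl (pvColStep R c) (m, false, false)).1 r' c' = pvCell m r' c')
  ∧ (((List.range k).foldl (pvColStep R c) (m, false, false)).1.length = m.length)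
  ∧ (∀ i, ((((List.range k).foldl (pvColStep R c) (m, false, false)).1.getD i []).length
      = (m.getD i []).length)) := by
  induction k with
  | zero =>
    refine ⟨by simp, by simp, ?_, fun _ _ _ => rfl, rfl, fun _ => rfl⟩
    intro r'
    rw [List.range_zero, List.foldl_nil, if_neg]
    rintro ⟨-, (⟨h, -⟩ | ⟨h1, h2, -⟩)⟩
    · omega
    · omega
  | succ k IH =>
    obtain ⟨IHfu, IHfd, IHcell, IHoth, IHlen, IHrow⟩ := IH (by omega)
    rw [List.range_succ, List.foldl_append]
    set st := (List.range k).foldl (pvColStep R c) (m, false, false) with hst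
    simp only [List.foldl_cons, List.foldl_nil]
    obtain ⟨p, hp⟩ : ∃ p, p = (if pvCell st.1 k c == "#" then (st.1, true)
        else if (!st.2.1) && (pvCell st.1 k c == " ") then (pvSet st.1 k c "", st.2.1)
        else (st.1, st.2.1)) := ⟨_, rfl⟩
    obtain ⟨q, hq⟩ : ∃ q, q = (if pvCell p.1 (R - 1 - k) c == "#" then (p.1, true)
        else if (!st.2.2) && (pvCell p.1 (R - 1 - k) c == " ") then
          (pvSet p.1 (R - 1 - k) c "", st.2.2)
        else (p.1, st.2.2)) := ⟨_, rfl⟩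
    have hstep : pvColStep R c st k = (q.1, p.2, q.2) := by
      rw [pvColStep]; rw [← hp, ← hq]
    rw [hstep]
    have h1 := blankStep st.1 (fun r => pvCell m r c)
        (fun r' => pvCell m r' c = " " ∧ ((r' < k ∧ ∀ i ≤ r', pvCell m i c ≠ "#")
          ∨ (R - k ≤ r' ∧ r' < R ∧ ∀ i, r' ≤ i → i < R → pvCell m i c ≠ "#")))
        c k st.2.1 (∃ i, i < k ∧ pvCell m i c = "#") p hp
        (fun r' => IHcell r') (fun r' h => h.1) IHfu
    obtain ⟨h1cell, h1flag, h1len, h1row, h1oth⟩ := h1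
    have h2 := blankStep p.1 (fun r => pvCell m r c)
        (fun r' => (pvCell m r' c = " " ∧ ((r' < k ∧ ∀ i ≤ r', pvCell m i c ≠ "#")
            ∨ (R - k ≤ r' ∧ r' < R ∧ ∀ i, r' ≤ i → i < R → pvCell m i c ≠ "#")))
          ∨ (r' = k ∧ pvCell m k c = " " ∧ ¬(∃ i, i < k ∧ pvCell m i c = "#")))
        c (R - 1 - k) st.2.2 (∃ i, i < k ∧ pvCell m (R - 1 - i) c = "#") q hq
        (fun r' => h1cell r')
        (by rintro r' (h | ⟨h1, h2, -⟩)
            · exact h.1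
            · subst h1; exact h2) IHfd
    obtain ⟨h2cell, h2flag, h2len, h2row, h2oth⟩ := h2
    refine ⟨?_, ?_, ?_, ?_, ?_, ?_⟩
    · show p.2 = _
      rw [h1flag]
      apply decide_eq_decide.mpr
      constructor
      · rintro (⟨i, hi, hc⟩ | hc)
        · exact ⟨i, by omega, hc⟩
        · exact ⟨k, by omega, hc⟩
      · rintro ⟨i, hi, hc⟩
        by_cases h : i < k
        · exact Or.inl ⟨i, h, hc⟩
        · have : i = k := by omega
          subst this; exact Or.inr hc
    · show q.2 = _
      rw [h2flag]
      apply decide_eq_decide.mpr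
      constructor
      · rintro (⟨i, hi, hc⟩ | hc)
        · exact ⟨i, by omega, hc⟩
        · exact ⟨k, by omega, hc⟩
      · rintro ⟨i, hi, hc⟩
        by_cases h : i < k
        · exact Or.inl ⟨i, h, hc⟩
        · have : i = k := by omega
          subst this; exact Or.inr hc
    · intro r'
      rw [h2cell r']
      have hiff : (((pvCell m r' c = " " ∧ ((r' < k ∧ ∀ i ≤ r', pvCell m i c ≠ "#")
            ∨ (R - k ≤ r' ∧ r' < R ∧ ∀ i, r' ≤ i → i < R → pvCell m i c ≠ "#")))
          ∨ (r' = k ∧ pvCell m k c = " " ∧ ¬(∃ i, i < k ∧ pvCell m i c = "#")))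
          ∨ (r' = R - 1 - k ∧ pvCell m (R - 1 - k) c = " "
            ∧ ¬(∃ i, i < k ∧ pvCell m (R - 1 - i) c = "#")))
          ↔ (pvCell m r' c = " " ∧ ((r' < k + 1 ∧ ∀ i ≤ r', pvCell m i c ≠ "#")
            ∨ (R - (k + 1) ≤ r' ∧ r' < R ∧ ∀ i, r' ≤ i → i < R → pvCell m i c ≠ "#"))) := by
        constructor
        · rintro ((⟨hsp, (⟨hlt, hU⟩ | ⟨hge, hltR, hD⟩)⟩ | ⟨he, hsp, hnF⟩) | ⟨he, hsp, hnF⟩)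
          · exact ⟨hsp, Or.inl ⟨by omega, hU⟩⟩
          · exact ⟨hsp, Or.inr ⟨by omega, hltR, hD⟩⟩
          · subst he
            refine ⟨hsp, Or.inl ⟨by omega, ?_⟩⟩
            intro i hi
            by_cases h : i < r'
            · exact fun hc => hnF ⟨i, h, hc⟩
            · have : i = r' := by omega
              subst this
              intro hc; rw [hc] at hsp; exact absurd hsp (by decide)
          · subst he
            refine ⟨hsp, Or.inr ⟨by omega, by omega, ?_⟩⟩
            intro i hi hiR
            by_cases h : i = R - 1 - k
            · subst h; intro hc; rw [hc] at hsp; exact absurd hsp (by decide)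
            · have he2 : i = R - 1 - (R - 1 - i) := by omega
              intro hc
              exact hnF ⟨R - 1 - i, by omega, by rw [← he2]; exact hc⟩
        · rintro ⟨hsp, (⟨hlt, hU⟩ | ⟨hge, hltR, hD⟩)⟩
          · by_cases h : r' < k
            · exact Or.inl (Or.inl ⟨hsp, Or.inl ⟨h, hU⟩⟩)
            · have he : r' = k := by omega
              subst he
              refine Or.inl (Or.inr ⟨rfl, hsp, ?_⟩)
              rintro ⟨i, hi, hc⟩
              exact hU i (by omega) hc
          · by_cases h : R - k ≤ r'
            · exact Or.inl (Or.inl ⟨hsp, Or.inr ⟨h, hltR, hD⟩⟩)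
            · have he : r' = R - 1 - k := by omega
              refine Or.inr ⟨he, by rw [← he]; exact hsp, ?_⟩
              rintro ⟨i, hi, hc⟩
              exact hD (R - 1 - i) (by omega) (by omega) hc
      rw [if_congr hiff rfl rfl]
    · intro r' c' hne
      rw [h2oth r' c' hne, h1oth r' c' hne, IHoth r' c' hne]
    · rw [h2len, h1len, IHlen]
    · intro i
      rw [h2row i, h1row i, IHrow i]

def pvPhase1 (maze : List (List String)) (k : Nat) : List (List String) :=
  (List.range k).foldl
    (fun m col => ((List.range maze.length).foldl (pvColStep maze.length col) (m, false, false)).1)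
    maze

def pvPhase2 (cols : Nat) (m1 : List (List String)) (k : Nat) : List (List String) :=
  (List.range k).foldl
    (fun m row => ((List.range cols).foldl (pvRowStep row) (m, false)).1) m1

theorem pvPhase1Inv (maze : List (List String)) (k : Nat) :
    (pvPhase1 maze k).length = maze.length
  ∧ (∀ i, ((pvPhase1 maze k).getD i []).length = (maze.getD i []).length)
  ∧ (∀ r c, pvCell (pvPhase1 maze k) r c =
      if c < k ∧ pvCell maze r c = " " ∧ ((∀ i ≤ r, pvCell maze i c ≠ "#")
          ∨ (∀ i, r ≤ i → i < maze.length → pvCell maze i c ≠ "#"))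
      then "" else pvCell maze r c) := by
  induction k with
  | zero =>
    refine ⟨rfl, fun _ => rfl, fun r c => ?_⟩
    rw [pvPhase1, List.range_zero, List.foldl_nil, if_neg]
    rintro ⟨h, -⟩; omega
  | succ k IH =>
    obtain ⟨IHlen, IHrow, IHcell⟩ := IH
    have hstep : pvPhase1 maze (k + 1)
        = ((List.range maze.length).foldl (pvColStep maze.length k)
            (pvPhase1 maze k, false, false)).1 := by
      rw [pvPhase1, List.range_succ, List.foldl_append]; rfl
    obtain ⟨-, -, Ccell, Coth, Clen, Crow⟩ :=
      colScanInv maze.length k (pvPhase1 maze k) (by rw [IHlen]) maze.length (le_refl _)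
    refine ⟨by rw [hstep, Clen, IHlen], fun i => by rw [hstep, Crow i, IHrow i], ?_⟩
    intro r c
    by_cases hc : c = k
    · subst hc
      have hV : ∀ i, pvCell (pvPhase1 maze c) i c = pvCell maze i c := by
        intro i; rw [IHcell i c, if_neg]; rintro ⟨h, -⟩; omega
      rw [hstep, Ccell r]
      simp only [hV]
      apply if_congr ?_ rfl rfl
      constructor
      · rintro ⟨hsp, (⟨-, hU⟩ | ⟨-, -, hD⟩)⟩
        · exact ⟨by omega, hsp, Or.inl hU⟩
        · exact ⟨by omega, hsp, Or.inr hD⟩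
      · rintro ⟨-, hsp, (hU | hD)⟩
        · exact ⟨hsp, Or.inl ⟨(pv_space_lt maze r c hsp).1, hU⟩⟩
        · exact ⟨hsp, Or.inr ⟨by omega, (pv_space_lt maze r c hsp).1, hD⟩⟩
    · rw [hstep, Coth r c hc, IHcell r c]
      apply if_congr ?_ rfl rfl
      constructor
      · rintro ⟨h1, h2⟩; exact ⟨by omega, h2⟩
      · rintro ⟨h1, h2⟩; exact ⟨by omega, h2⟩

theorem pvPhase2Inv (cols : Nat) (m1 : List (List String)) (k : Nat) :
    (pvPhase2 cols m1 k).length = m1.length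
  ∧ (∀ i, ((pvPhase2 cols m1 k).getD i []).length = (m1.getD i []).length)
  ∧ (∀ r c, pvCell (pvPhase2 cols m1 k) r c =
      if r < k ∧ c < cols ∧ pvCell m1 r c = " " ∧ (∀ j ≤ c, pvCell m1 r j ≠ "#")
      then "" else pvCell m1 r c) := by
  induction k with
  | zero =>
    refine ⟨rfl, fun _ => rfl, fun r c => ?_⟩
    rw [pvPhase2, List.range_zero, List.foldl_nil, if_neg]
    rintro ⟨h, -⟩; omega
  | succ k IH =>
    obtain ⟨IHlen, IHrow, IHcell⟩ := IH
    have hstep : pvPhase2 cols m1 (k + 1)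
        = ((List.range cols).foldl (pvRowStep k) (pvPhase2 cols m1 k, false)).1 := by
      rw [pvPhase2, List.range_succ, List.foldl_append]; rfl
    obtain ⟨-, Rcell, Rlen, Rrow⟩ := rowScanInv (pvPhase2 cols m1 k) k cols
    refine ⟨by rw [hstep, Rlen, IHlen], fun i => by rw [hstep, Rrow i, IHrow i], ?_⟩
    intro r c
    have hV : ∀ c', pvCell (pvPhase2 cols m1 k) k c' = pvCell m1 k c' := by
      intro c'; rw [IHcell k c', if_neg]; rintro ⟨h, -⟩; omega
    by_cases hr : r = k
    · subst hr
      rw [hstep, Rcell r c]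
      simp only [hV]
      apply if_congr ?_ rfl rfl
      constructor
      · rintro ⟨-, h2, h3, h4⟩
        exact ⟨by omega, h2, h3, h4⟩
      · rintro ⟨-, h2, h3, h4⟩
        exact ⟨by trivial, h2, h3, h4⟩
    · rw [hstep, Rcell r c, if_neg (by rintro ⟨h, -⟩; exact hr h), IHcell r c]
      apply if_congr ?_ rfl rfl
      constructor
      · rintro ⟨h1, h2⟩; exact ⟨by omega, h2⟩
      · rintro ⟨h1, h2⟩; exact ⟨by omega, h2⟩

theorem A_eq_phases (maze : List (List String)) :
    check_maze maze
      = pvPhase2 (maze.getD 0 []).length (pvPhase1 maze (maze.getD 0 []).length) maze.length :=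
  rfl

theorem A_cell (maze : List (List String)) :
    (check_maze maze).length = maze.length
  ∧ (∀ i, ((check_maze maze).getD i []).length = (maze.getD i []).length)
  ∧ (∀ r c, pvCell (check_maze maze) r c =
      if pvCell maze r c = " " ∧ c < (maze.getD 0 []).length ∧
         ((∀ i ≤ r, pvCell maze i c ≠ "#")
        ∨ (∀ i, r ≤ i → i < maze.length → pvCell maze i c ≠ "#")
        ∨ (∀ j ≤ c, pvCell maze r j ≠ "#"))
      then "" else pvCell maze r c) := by
  obtain ⟨P1len, P1row, P1cell⟩ := pvPhase1Inv maze (maze.getD 0 []).length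
  obtain ⟨P2len, P2row, P2cell⟩ :=
    pvPhase2Inv (maze.getD 0 []).length (pvPhase1 maze (maze.getD 0 []).length) maze.length
  rw [A_eq_phases]
  refine ⟨by rw [P2len, P1len], fun i => by rw [P2row i, P1row i], ?_⟩
  intro r c
  have hhash : ∀ r' j, (pvCell (pvPhase1 maze (maze.getD 0 []).length) r' j = "#"
      ↔ pvCell maze r' j = "#") := by
    intro r' j
    rw [P1cell r' j]
    split_ifs with h
    · constructor
      · intro hc; exact absurd hc.symm (by decide)
      · intro hc; rw [hc] at h; exact absurd h.2.1.symm (by decide)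
    · exact Iff.rfl
  rw [P2cell r c]
  by_cases hsp : pvCell maze r c = " "
  · by_cases hcC : c < (maze.getD 0 []).length
    · by_cases hUD : (∀ i ≤ r, pvCell maze i c ≠ "#")
          ∨ (∀ i, r ≤ i → i < maze.length → pvCell maze i c ≠ "#")
      · -- column pass blanked it
        have hm1 : pvCell (pvPhase1 maze (maze.getD 0 []).length) r c = "" := by
          rw [P1cell r c, if_pos ⟨hcC, hsp, hUD⟩]
        rw [if_neg (by rintro ⟨-, -, h, -⟩; rw [hm1] at h; exact absurd h (by decide)), hm1,
          if_pos ⟨hsp, hcC, by tauto⟩]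
      · have hm1 : pvCell (pvPhase1 maze (maze.getD 0 []).length) r c = " " := by
          rw [P1cell r c, if_neg (by rintro ⟨-, -, h⟩; exact hUD h)]; exact hsp
        by_cases hL : ∀ j ≤ c, pvCell maze r j ≠ "#"
        · rw [if_pos ⟨(pv_space_lt maze r c hsp).1, hcC, hm1,
              fun j hj hc => hL j hj ((hhash r j).mp hc)⟩,
            if_pos ⟨hsp, hcC, Or.inr (Or.inr hL)⟩]
        · have hn1 : ¬(r < maze.length ∧ c < (maze.getD 0 []).length ∧
              pvCell (pvPhase1 maze (maze.getD 0 []).length) r c = " " ∧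
              ∀ j ≤ c, pvCell (pvPhase1 maze (maze.getD 0 []).length) r j ≠ "#") := by
            rintro ⟨-, -, -, h⟩
            exact hL fun j hj hc => h j hj ((hhash r j).mpr hc)
          have hn2 : ¬(pvCell maze r c = " " ∧ c < (maze.getD 0 []).length ∧
              ((∀ i ≤ r, pvCell maze i c ≠ "#")
              ∨ (∀ i, r ≤ i → i < maze.length → pvCell maze i c ≠ "#")
              ∨ (∀ j ≤ c, pvCell maze r j ≠ "#"))) := by
            rintro ⟨-, -, (h | h | h)⟩
            · exact hUD (Or.inl h)
            · exact hUD (Or.inr h)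
            · exact hL h
          rw [if_neg hn1, if_neg hn2, hm1]
          exact hsp.symm
    · have hm1 : pvCell (pvPhase1 maze (maze.getD 0 []).length) r c = " " := by
        rw [P1cell r c, if_neg (by rintro ⟨h, -⟩; exact hcC h)]
        exact hsp
      rw [if_neg (by rintro ⟨-, h, -⟩; exact hcC h), hm1,
        if_neg (by rintro ⟨-, h, -⟩; exact hcC h)]
      exact hsp.symm
  · have hm1 : pvCell (pvPhase1 maze (maze.getD 0 []).length) r c = pvCell maze r c := by
      rw [P1cell r c, if_neg (by rintro ⟨-, h, -⟩; exact hsp h)]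
    rw [if_neg (by rintro ⟨-, -, h, -⟩; rw [hm1] at h; exact hsp h), hm1,
      if_neg (by rintro ⟨h, -⟩; exact hsp h)]

theorem aux_head (l : List Nat) (hp : l.Pairwise (· < ·)) (y : Nat) (hy : y ∈ l)
    (x : Nat) (hx : l.head? = some x) : x ≤ y := by
  induction l with
  | nil => cases hy
  | cons a t IH =>
    rw [List.head?_cons, Option.some_inj] at hx
    subst hx
    rcases List.mem_cons.mp hy with h | h
    · omega
    · exact le_of_lt ((List.pairwise_cons.mp hp).1 y h)

theorem aux_last (l : List Nat) (hp : l.Pairwise (· < ·)) (y : Nat) (hy : y ∈ l)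
    (x : Nat) (hx : l.getLast? = some x) : y ≤ x := by
  induction l with
  | nil => cases hy
  | cons a t IH =>
    cases t with
    | nil =>
      simp only [List.getLast?_singleton, Option.some_inj] at hx
      subst hx
      simp only [List.mem_singleton] at hy
      omega
    | cons b t' =>
      rw [List.getLast?_cons_cons] at hx
      rcases List.mem_cons.mp hy with h | h
      · subst h
        have hx' := List.mem_of_getLast? hx
        exact le_of_lt ((List.pairwise_cons.mp hp).1 x hx')
      · exact IH (List.pairwise_cons.mp hp).2 h hx

theorem bridge_head (n r : Nat) (p : Nat → Bool) (hr : r < n) :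
    r < ((List.range n).filter p).headD n ↔ ∀ i ≤ r, p i = false := by
  have hpw : ((List.range n).filter p).Pairwise (· < ·) :=
    (List.pairwise_lt_range).filter p
  cases hl : (List.range n).filter p with
  | nil =>
    simp only [List.headD_nil]
    constructor
    · intro _ i hi
      have := List.filter_eq_nil_iff.mp hl i (List.mem_range.mpr (by omega))
      simpa using this
    · intro _; exact hr
  | cons x xs =>
    simp only [List.headD_cons]
    constructor
    · intro hlt i hi
      by_contra hpi
      have hpi' : p i = true := by revert hpi; cases p i <;> simp
      have hmem : i ∈ (List.range n).filter p :=
        List.mem_filter.mpr ⟨List.mem_range.mpr (by omega), hpi'⟩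
      rw [hl] at hmem
      have := aux_head (x :: xs) (hl ▸ hpw) i hmem x rfl
      omega
    · intro hall
      have hmem : x ∈ (List.range n).filter p := by rw [hl]; exact List.mem_cons_self
      have hpx := (List.mem_filter.mp hmem).2
      by_contra hle
      exact absurd hpx (by rw [hall x (by omega)]; decide)

theorem bridge_last (n r : Nat) (p : Nat → Bool) :
    ((r : Int) > (((List.range n).filter p).getLast?).elim (-1 : Int) (fun v => (v : Int)))
      ↔ ∀ i, r ≤ i → i < n → p i = false := by
  have hpw : ((List.range n).filter p).Pairwise (· < ·) :=
    (List.pairwise_lt_range).filter p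
  cases hl : ((List.range n).filter p).getLast? with
  | none =>
    have hnil : (List.range n).filter p = [] := List.getLast?_eq_none_iff.mp hl
    simp only [Option.elim_none]
    constructor
    · intro _ i hge hin
      have := List.filter_eq_nil_iff.mp hnil i (List.mem_range.mpr hin)
      simpa using this
    · intro _
      omega
  | some x =>
    simp only [Option.elim_some]
    constructor
    · intro hlt i hge hin
      by_contra hpi
      have hpi' : p i = true := by revert hpi; cases p i <;> simp
      have hmem : i ∈ (List.range n).filter p :=
        List.mem_filter.mpr ⟨List.mem_range.mpr hin, hpi'⟩
      have hle := aux_last _ hpw i hmem x hl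
      omega
    · intro hall
      have hmem := List.mem_of_getLast? hl
      have hpx := (List.mem_filter.mp hmem).2
      have hxn := List.mem_range.mp (List.mem_filter.mp hmem).1
      by_cases h : r ≤ x
      · exact absurd hpx (by rw [hall x h hxn]; decide)
      · omega

theorem map_range_getD {α : Type} (f : Nat → α) (n c : Nat) (d : α) (h : c < n) :
    ((List.range n).map f).getD c d = f c := by
  rw [List.getD_eq_getElem?_getD, List.getElem?_map, List.getElem?_range h]
  rfl

theorem getD_set_list (m : List (List String)) (r : Nat) (v : List String) (i : Nat) :
    (m.set r v).getD i [] = if i = r ∧ r < m.length then v else m.getD i [] := by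
  by_cases h2 : r < m.length
  · by_cases h1 : i = r
    · subst h1
      simp [h2, List.getD_eq_getElem?_getD]
    · simp [h1, List.getD_eq_getElem?_getD, List.getElem?_set_ne (fun h => h1 h.symm)]
  · rw [List.set_eq_of_length_le (by omega)]
    simp [h2]

def pvBStep (maze m : List (List String)) (r : Nat) : List (List String) :=
  let rows := maze.length
  let cols := (maze.getD 0 []).length
  let top : List Nat := (List.range cols).map (fun c => (pvColHash maze rows c).headD rows)
  let bot : List Int := (List.range cols).map
      (fun c => ((pvColHash maze rows c).getLast?).elim (-1 : Int) (fun x => (x : Int)))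
  let first := ((List.range cols).filter (fun c => pvCell m r c == "#")).headD cols
  m.set r (((List.range cols).map (fun c =>
      if pvCell m r c == " " &&
         (decide (r < top.getD c 0) || decide ((r : Int) > bot.getD c (-1))
          || decide (c < first))
      then "" else pvCell m r c)) ++ ((m.getD r []).drop cols))

theorem B_eq_fold (maze : List (List String)) :
    check_maze_alt maze = (List.range maze.length).foldl (pvBStep maze) maze := rfl

def pvBRow (maze : List (List String)) (r : Nat) : List String :=
  let rows := maze.length
  let cols := (maze.getD 0 []).length
  let top : List Nat := (List.range cols).map (fun c => (pvColHash maze rows c).headD rows)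
  let bot : List Int := (List.range cols).map
      (fun c => ((pvColHash maze rows c).getLast?).elim (-1 : Int) (fun x => (x : Int)))
  let first := ((List.range cols).filter (fun c => pvCell maze r c == "#")).headD cols
  ((List.range cols).map (fun c =>
      if pvCell maze r c == " " &&
         (decide (r < top.getD c 0) || decide ((r : Int) > bot.getD c (-1))
          || decide (c < first))
      then "" else pvCell maze r c)) ++ ((maze.getD r []).drop cols)

theorem pvBStep_eq (maze m : List (List String)) (r : Nat)
    (hrow : m.getD r [] = maze.getD r []) :
    pvBStep maze m r = m.set r (pvBRow maze r) := by
  simp only [pvBStep, pvBRow, pvCell, hrow]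
  rfl

theorem B_inv (maze : List (List String)) (k : Nat) (hk : k ≤ maze.length) :
    ((List.range k).foldl (pvBStep maze) maze).length = maze.length
  ∧ (∀ r, k ≤ r → ((List.range k).foldl (pvBStep maze) maze).getD r [] = maze.getD r [])
  ∧ (∀ r, r < k → ((List.range k).foldl (pvBStep maze) maze).getD r [] = pvBRow maze r) := by
  induction k with
  | zero => exact ⟨rfl, fun _ _ => rfl, fun r h => absurd h (by omega)⟩
  | succ k IH =>
    obtain ⟨IHlen, IHhi, IHlo⟩ := IH (by omega)
    rw [List.range_succ, List.foldl_append]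
    set st := (List.range k).foldl (pvBStep maze) maze with hst
    simp only [List.foldl_cons, List.foldl_nil]
    have hstep : pvBStep maze st k = st.set k (pvBRow maze k) :=
      pvBStep_eq maze st k (IHhi k (le_refl k))
    rw [hstep]
    refine ⟨by rw [List.length_set, IHlen], ?_, ?_⟩
    · intro r hr
      rw [getD_set_list, if_neg (by rintro ⟨h, -⟩; omega), IHhi r (by omega)]
    · intro r hr
      by_cases he : r = k
      · subst he
        rw [getD_set_list, if_pos ⟨rfl, by rw [IHlen]; omega⟩]
      · rw [getD_set_list, if_neg (by rintro ⟨h, -⟩; exact he h), IHlo r (by omega)]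

theorem pvBRow_len (maze : List (List String)) (r : Nat)
    (hC : (maze.getD 0 []).length ≤ (maze.getD r []).length) :
    (pvBRow maze r).length = (maze.getD r []).length := by
  simp only [pvBRow]
  rw [List.length_append, List.length_map, List.length_range, List.length_drop]
  omega

theorem pvBRow_cell (maze : List (List String)) (r c : Nat) (hr : r < maze.length) :
    (pvBRow maze r).getD c "" =
      if pvCell maze r c = " " ∧ c < (maze.getD 0 []).length ∧
         ((∀ i ≤ r, pvCell maze i c ≠ "#")
        ∨ (∀ i, r ≤ i → i < maze.length → pvCell maze i c ≠ "#")
        ∨ (∀ j ≤ c, pvCell maze r j ≠ "#"))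
      then "" else pvCell maze r c := by
  by_cases hc : c < (maze.getD 0 []).length
  · have hget : (pvBRow maze r).getD c "" =
        (if pvCell maze r c == " " &&
            (decide (r < ((List.range (maze.getD 0 []).length).map
                (fun c => (pvColHash maze maze.length c).headD maze.length)).getD c 0)
             || decide ((r : Int) > ((List.range (maze.getD 0 []).length).map
                (fun c => ((pvColHash maze maze.length c).getLast?).elim (-1 : Int)
                  (fun x => (x : Int)))).getD c (-1))
             || decide (c < ((List.range (maze.getD 0 []).length).filter
                (fun j => pvCell maze r j == "#")).headD (maze.getD 0 []).length))
         then "" else pvCell maze r c) := by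
      simp only [pvBRow]
      rw [List.getD_eq_getElem?_getD,
        List.getElem?_append_left (by rw [List.length_map, List.length_range]; exact hc),
        List.getElem?_map, List.getElem?_range hc]
      rfl
    rw [hget, map_range_getD _ _ _ _ hc, map_range_getD _ _ _ _ hc]
    have htop : (r < (pvColHash maze maze.length c).headD maze.length)
        ↔ (∀ i ≤ r, pvCell maze i c ≠ "#") := by
      rw [pvColHash, bridge_head maze.length r _ hr]
      constructor
      · intro h i hi
        have := h i hi
        simpa using this
      · intro h i hi
        simpa using h i hi
    have hbot : ((r : Int) > ((pvColHash maze maze.length c).getLast?).elim (-1 : Int)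
          (fun x => (x : Int)))
        ↔ (∀ i, r ≤ i → i < maze.length → pvCell maze i c ≠ "#") := by
      rw [pvColHash, bridge_last maze.length r _]
      constructor
      · intro h i hi1 hi2
        have := h i hi1 hi2
        simpa using this
      · intro h i hi1 hi2
        simpa using h i hi1 hi2
    have hfirst : (c < ((List.range (maze.getD 0 []).length).filter
          (fun j => pvCell maze r j == "#")).headD (maze.getD 0 []).length)
        ↔ (∀ j ≤ c, pvCell maze r j ≠ "#") := by
      rw [bridge_head (maze.getD 0 []).length c _ hc]
      constructor
      · intro h i hi
        have := h i hi
        simpa using this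
      · intro h i hi
        simpa using h i hi
    by_cases hP : pvCell maze r c = " " ∧ c < (maze.getD 0 []).length ∧
         ((∀ i ≤ r, pvCell maze i c ≠ "#")
        ∨ (∀ i, r ≤ i → i < maze.length → pvCell maze i c ≠ "#")
        ∨ (∀ j ≤ c, pvCell maze r j ≠ "#"))
    · rw [if_pos hP]
      have hb : (pvCell maze r c == " " &&
          (decide (r < (pvColHash maze maze.length c).headD maze.length)
           || decide ((r : Int) > ((pvColHash maze maze.length c).getLast?).elim (-1 : Int)
              (fun x => (x : Int)))
           || decide (c < ((List.range (maze.getD 0 []).length).filter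
              (fun j => pvCell maze r j == "#")).headD (maze.getD 0 []).length))) = true := by
        obtain ⟨h1, -, h3⟩ := hP
        rw [Bool.and_eq_true, beq_iff_eq]
        refine ⟨h1, ?_⟩
        rw [Bool.or_eq_true, Bool.or_eq_true, decide_eq_true_eq, decide_eq_true_eq,
          decide_eq_true_eq, htop, hbot, hfirst]
        tauto
      rw [hb]
      rfl
    · rw [if_neg hP]
      have hb : (pvCell maze r c == " " &&
          (decide (r < (pvColHash maze maze.length c).headD maze.length)
           || decide ((r : Int) > ((pvColHash maze maze.length c).getLast?).elim (-1 : Int)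
              (fun x => (x : Int)))
           || decide (c < ((List.range (maze.getD 0 []).length).filter
              (fun j => pvCell maze r j == "#")).headD (maze.getD 0 []).length))) = false := by
        rw [Bool.and_eq_false_iff]
        by_cases h1 : pvCell maze r c = " "
        · right
          rw [Bool.or_eq_false_iff, Bool.or_eq_false_iff]
          rw [decide_eq_false_iff_not, decide_eq_false_iff_not, decide_eq_false_iff_not,
            htop, hbot, hfirst]
          constructor
          constructor
          · intro h; exact hP ⟨h1, hc, Or.inl h⟩
          · intro h; exact hP ⟨h1, hc, Or.inr (Or.inl h)⟩
          · intro h; exact hP ⟨h1, hc, Or.inr (Or.inr h)⟩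
        · left
          rw [beq_eq_false_iff_ne]
          exact h1
      rw [hb]
      rfl
  · have hget : (pvBRow maze r).getD c "" = (maze.getD r []).getD c "" := by
      simp only [pvBRow]
      rw [List.getD_eq_getElem?_getD,
        List.getElem?_append_right (by rw [List.length_map, List.length_range]; omega),
        List.length_map, List.length_range, List.getElem?_drop,
        ← List.getD_eq_getElem?_getD]
      congr 1
      omega
    rw [hget, if_neg (by rintro ⟨-, h, -⟩; exact hc h)]
    rfl

theorem getD_eq_getElem' {α : Type} (l : List α) (d : α) (i : Nat) (h : i < l.length) :
    l.getD i d = l[i] := by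
  rw [List.getD_eq_getElem?_getD, List.getElem?_eq_getElem h]
  rfl

theorem check_maze_agree (maze : List (List String))
    (hpre : maze ≠ [] ∧ ∀ row ∈ maze, (maze.getD 0 []).length ≤ row.length) :
    check_maze maze = check_maze_alt maze := by
  obtain ⟨Alen, Arow, Acell⟩ := A_cell maze
  rw [B_eq_fold]
  obtain ⟨Blen, Bhi, Blo⟩ := B_inv maze maze.length (le_refl _)
  apply List.ext_getElem (by rw [Alen, Blen])
  intro r h1 h2
  have hrR : r < maze.length := by rw [Alen] at h1; exact h1
  rw [← getD_eq_getElem' _ [] r h1, ← getD_eq_getElem' _ [] r h2, Blo r hrR]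
  have hrowmem : maze.getD r [] ∈ maze := by
    rw [getD_eq_getElem' _ [] r hrR]
    exact List.getElem_mem _
  have hCle := hpre.2 _ hrowmem
  apply List.ext_getElem (by rw [Arow r, pvBRow_len maze r hCle])
  intro c hc1 hc2
  rw [← getD_eq_getElem' _ "" c hc1, ← getD_eq_getElem' _ "" c hc2]
  have e1 : ((check_maze maze).getD r []).getD c "" = pvCell (check_maze maze) r c := rfl
  rw [e1, Acell r c, pvBRow_cell maze r c hrR]

-- ===== VERDICT (by name: the statement is the Claim_ definition above) =====
theorem check_maze_spec : Claim_equal_check_maze := by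
  intro maze _ hpre
  exact check_maze_agree maze hpre
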